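-- pv_equiv track=rewrite | github.com/aniollidon/rebuscada | server.py | calcular_joc_actual
-- ===== SOURCE A (Python) =====
-- def calcular_joc_actual(games: list, days_diff: int) -> int:
--     """Calcula l'ID del joc actual basat en els dies transcorreguts i la durada de cada joc.
--     Cada joc té un camp 'dies' que indica quants dies dura (1=diari, 7=setmanal).
--     Retorna l'ID del joc que correspon al dia actual.
--     """
--     sorted_games = sorted(games, key=lambda g: g.get("id", 0))
--     cumulative_days = 0
--     for game in sorted_games:
--         dies = game.get("dies", 1)
--         if days_diff < cumulative_days + dies:
--             return game.get("id", 1)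
--         cumulative_days += dies
--     # Si hem superat tots els jocs, retorna l'últim
--     return sorted_games[-1].get("id", 1) if sorted_games else 1
-- ===== SOURCE B (Python) =====
-- def calcular_joc_actual(games: list, days_diff: int) -> int:
--     """Table-first re-implementation: build the cumulative-duration prefix
--     table, then look up the first bucket whose bound exceeds days_diff."""
--     ordered = sorted(games, key=lambda g: g.get("id", 0))
--     prefix = []
--     total = 0
--     for g in ordered:
--         total += g.get("dies", 1)
--         prefix.append(total)
--     idx = next((i for i, bound in enumerate(prefix) if days_diff < bound), None)
--     if idx is not None:
--         return ordered[idx].get("id", 1)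
--     return ordered[-1].get("id", 1) if ordered else 1
-- ===== Notes on version B (the rewrite author's own statement) =====
-- stated objective: alternative
-- what changed: A's single fused scan carrying a running cumulative_days accumulator with an early return is replaced by a staged table-then-lookup design: first build the full prefix-sum table of durations, then find the index of the first prefix bound exceeding days_diff and index back into the sorted list.
import Mathlib
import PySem

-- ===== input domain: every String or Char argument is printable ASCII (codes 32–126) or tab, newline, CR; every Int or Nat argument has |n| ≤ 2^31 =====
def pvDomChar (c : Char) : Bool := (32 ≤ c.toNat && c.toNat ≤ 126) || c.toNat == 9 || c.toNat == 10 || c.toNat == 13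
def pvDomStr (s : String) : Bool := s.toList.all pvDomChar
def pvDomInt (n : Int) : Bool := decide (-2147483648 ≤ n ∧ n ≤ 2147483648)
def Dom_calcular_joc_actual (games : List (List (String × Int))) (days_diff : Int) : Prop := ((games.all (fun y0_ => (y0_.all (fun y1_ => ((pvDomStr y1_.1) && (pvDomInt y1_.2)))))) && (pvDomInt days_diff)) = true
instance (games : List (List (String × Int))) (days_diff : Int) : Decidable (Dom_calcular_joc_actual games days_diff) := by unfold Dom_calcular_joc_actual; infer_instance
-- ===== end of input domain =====

-- B replaces A's fused scan (running cumulative_days + early return) by a staged table-then-lookup: build the prefix-sum table of durations, find the first bound exceeding days_diff, index back into the sorted list (alternative decomposition, same result).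


-- ===== PORT A =====
-- A's for-loop with early return and running cumulative_days; `none` = loop fell through.
def calcAloop (days_diff : Int) : List (List (String × Int)) → Int → Option Int
  | [], _ => none
  | game :: rest, cumulative_days =>
    let dies := PySem.Dict.getD ⟨game⟩ "dies" 1
    if days_diff < cumulative_days + dies then some (PySem.Dict.getD ⟨game⟩ "id" 1)
    else calcAloop days_diff rest (cumulative_days + dies)

def calcular_joc_actual (games : List (List (String × Int))) (days_diff : Int) : Int :=
  let sorted_games := PySem.List.sorted games (fun g => PySem.Dict.getD ⟨g⟩ "id" 0) false
  match calcAloop days_diff sorted_games 0 with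
  | some r => r
  | none =>
    -- sorted_games[-1].get("id", 1) if sorted_games else 1
    match PySem.List.pyGet? sorted_games (-1) with
    | some g => PySem.Dict.getD ⟨g⟩ "id" 1
    | none => 1

-- ===== PORT B =====
-- Source B's first pass: the prefix-sum table of g.get("dies", 1) (running `total` threaded through).
def calcBprefix : List (List (String × Int)) → Int → List Int
  | [], _ => []
  | g :: rest, total =>
    let t := total + PySem.Dict.getD ⟨g⟩ "dies" 1
    t :: calcBprefix rest t

def calcular_joc_actual_alt (games : List (List (String × Int))) (days_diff : Int) : Int :=
  let ordered := PySem.List.sorted games (fun g => PySem.Dict.getD ⟨g⟩ "id" 0) false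
  let pre := calcBprefix ordered 0
  -- idx = next((i for i, bound in enumerate(prefix) if days_diff < bound), None)
  match pre.findIdx? (fun bound => days_diff < bound) with
  | some idx =>
    match PySem.List.pyGet? ordered (idx : Int) with
    | some g => PySem.Dict.getD ⟨g⟩ "id" 1
    | none => 1   -- unreachable: idx < |prefix| = |ordered|
  | none =>
    match PySem.List.pyGet? ordered (-1) with
    | some g => PySem.Dict.getD ⟨g⟩ "id" 1
    | none => 1

-- ===== PRECONDITION & SPEC =====
def Spec_calcular_joc_actual (games : List (List (String × Int))) (days_diff : Int) (out : Int) : Prop := out = calcular_joc_actual_alt games days_diff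
instance (games : List (List (String × Int))) (days_diff : Int) (out : Int) : Decidable (Spec_calcular_joc_actual games days_diff out) := by unfold Spec_calcular_joc_actual; infer_instance

-- ===== CLAIM =====
def Claim_equal_calcular_joc_actual : Prop := ∀ (games : List (List (String × Int))) (days_diff : Int), Dom_calcular_joc_actual games days_diff → Spec_calcular_joc_actual games days_diff (calcular_joc_actual games days_diff)

-- ===== LEMMAS AND PROOFS =====
def calcLookup (l : List (List (String × Int))) (idx : Nat) : Int :=
  match PySem.List.pyGet? l (idx : Int) with
  | some g => PySem.Dict.getD ⟨g⟩ "id" 1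
  | none => 1

lemma calcA_eq_lookup (dd : Int) :
    ∀ (l : List (List (String × Int))) (cum : Int),
      calcAloop dd l cum =
        ((calcBprefix l cum).findIdx? (fun bound => dd < bound)).map (calcLookup l) := by
  intro l
  induction l with
  | nil => intro cum; simp [calcAloop, calcBprefix]
  | cons game rest ih =>
    intro cum
    simp only [calcAloop, calcBprefix, List.findIdx?_cons]
    by_cases h : dd < cum + PySem.Dict.getD ⟨game⟩ "dies" 1
    · simp [h, calcLookup]
    · simp only [h, decide_false, Bool.false_eq_true, if_false,
        ih (cum + PySem.Dict.getD ⟨game⟩ "dies" 1), Option.map_map]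
      congr 1
      funext idx
      have hc : ((idx + 1 : Nat) : Int) = (idx : Int) + 1 := by push_cast; ring
      simp [Function.comp, calcLookup, hc, PySem.List.pyGet?_cons_succ]

-- ===== VERDICT =====
theorem calcular_joc_actual_spec : Claim_equal_calcular_joc_actual := by
  intro games days_diff _
  unfold Spec_calcular_joc_actual calcular_joc_actual calcular_joc_actual_alt
  simp only [calcA_eq_lookup]
  cases h : (calcBprefix (PySem.List.sorted games (fun g => PySem.Dict.getD ⟨g⟩ "id" 0) false) 0).findIdx?
      (fun bound => days_diff < bound) <;> simp [calcLookup]
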